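-- pv_equiv track=rewrite | github.com/simmerlee/flagtree | third_party/cambricon/python/triton/language/_utils.py | validate_block_shape
-- ===== SOURCE A (Python) =====
-- from typing import List
--
-- TRITON_MAX_TENSOR_NUMEL = 104857600
--
-- def validate_block_shape(shape: List[int]):
--     numel = 1
--     for i, d in enumerate(shape):
--         if not isinstance(d, int):
--             raise TypeError(f"Shape element {i} must have type `constexpr[int]`, got `constexpr[{type(d)}]")
--         # Cambricon specific.
--         # if not is_power_of_two(d):
--         #     raise ValueError(f"Shape element {i} must be a power of 2")
--         numel *= d
--
--     if numel > TRITON_MAX_TENSOR_NUMEL: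
--         raise ValueError(f"numel ({numel}) exceeds triton maximum tensor numel ({TRITON_MAX_TENSOR_NUMEL})")
--     return numel
-- ===== SOURCE B (Python) =====
-- from typing import List
--
-- TRITON_MAX_TENSOR_NUMEL = 104857600
--
-- def validate_block_shape(shape: List[int]):
--     # Divide-and-conquer: validate-and-multiply the half-open segment [lo, hi)
--     # by splitting it in the middle; left half evaluated first, so the first
--     # invalid element (lowest index) still raises the identical TypeError.
--     def prod_range(lo, hi):
--         n = hi - lo
--         if n == 0:
--             return 1
--         if n == 1:
--             d = shape[lo]
--             if not isinstance(d, int):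
--                 raise TypeError(f"Shape element {lo} must have type `constexpr[int]`, got `constexpr[{type(d)}]")
--             return d
--         mid = (lo + hi) // 2
--         return prod_range(lo, mid) * prod_range(mid, hi)
--
--     numel = prod_range(0, len(shape))
--     if numel > TRITON_MAX_TENSOR_NUMEL:
--         raise ValueError(f"numel ({numel}) exceeds triton maximum tensor numel ({TRITON_MAX_TENSOR_NUMEL})")
--     return numel
-- ===== Notes on version B (the rewrite author's own statement) =====
-- stated objective: alternative
-- what changed: Replaces A's single left-to-right enumerate loop with a divide-and-conquer recursion that validates and multiplies the two halves of the index range and combines their products (balanced multiplication tree instead of a linear accumulator).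
import Mathlib
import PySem

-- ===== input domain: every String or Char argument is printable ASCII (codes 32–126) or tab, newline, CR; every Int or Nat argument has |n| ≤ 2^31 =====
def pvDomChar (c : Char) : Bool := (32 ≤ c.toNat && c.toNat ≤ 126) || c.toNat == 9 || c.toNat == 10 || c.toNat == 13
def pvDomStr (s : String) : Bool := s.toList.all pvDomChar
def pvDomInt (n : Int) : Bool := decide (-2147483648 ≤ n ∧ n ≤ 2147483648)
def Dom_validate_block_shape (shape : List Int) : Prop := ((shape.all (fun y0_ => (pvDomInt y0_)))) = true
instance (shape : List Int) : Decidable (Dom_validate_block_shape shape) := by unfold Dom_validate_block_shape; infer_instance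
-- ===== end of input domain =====

-- B replaces A's iterative enumerate loop (left accumulator) by a divide-and-conquer
-- recursion over the index range that multiplies the products of the two halves; the
-- isinstance check is vacuous on Int. Equivalence is about the return value; the
-- ValueError raise (numel > max) is excluded by Pre_.

-- ===== PORT A =====
-- A: numel accumulated while looping over enumerate(shape); isinstance always holds for Int.
def validate_block_shape (shape : List Int) : Int :=
  (PySem.List.enumerate shape).foldl (fun numel (_, d) => numel * d) 1

-- ===== PORT B =====
-- B: prod_range(lo, hi) on the half-open segment [lo, hi); indices are always in
-- 0..len(shape), so Python's shape[lo] is ported as getD lo 0 (exact in range) and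
-- (lo+hi)//2 on nonnegative ints is Nat division (exact).
def pvProdRange (shape : List Int) (lo hi : Nat) : Int :=
  if hi - lo = 0 then 1
  else if hi - lo = 1 then shape.getD lo 0
  else pvProdRange shape lo ((lo + hi) / 2) * pvProdRange shape ((lo + hi) / 2) hi
termination_by hi - lo
decreasing_by all_goals omega

def validate_block_shape_alt (shape : List Int) : Int :=
  pvProdRange shape 0 shape.length

-- ===== PRECONDITION & SPEC =====
-- Pre_ excludes exactly the inputs where A (and B) raise ValueError: product > TRITON_MAX_TENSOR_NUMEL.
def Pre_validate_block_shape (shape : List Int) : Prop := shape.prod ≤ 104857600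
instance (shape : List Int) : Decidable (Pre_validate_block_shape shape) := by unfold Pre_validate_block_shape; infer_instance
def pvWitness_validate_block_shape : List Int := [2, 3]

def Spec_validate_block_shape (shape : List Int) (out : Int) : Prop := out = validate_block_shape_alt shape
instance (shape : List Int) (out : Int) : Decidable (Spec_validate_block_shape shape out) := by unfold Spec_validate_block_shape; infer_instance

-- ===== CLAIM =====
def Claim_equal_validate_block_shape : Prop := ∀ (shape : List Int), Dom_validate_block_shape shape → Pre_validate_block_shape shape → Spec_validate_block_shape shape (validate_block_shape shape)

-- ===== LEMMAS AND PROOFS =====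
theorem pv_foldl_enum_mul (l : List Int) (i : Int) (acc : Int) :
    (PySem.List.enumerate l i).foldl (fun numel (_, d) => numel * d) acc = acc * l.prod := by
  induction l generalizing i acc with
  | nil => simp
  | cons x xs ih => simp [PySem.List.enumerate_cons, ih, mul_assoc]

theorem pv_prodRange_eq (shape : List Int) :
    ∀ n lo hi, hi - lo = n → hi ≤ shape.length →
      pvProdRange shape lo hi = ((shape.drop lo).take (hi - lo)).prod := by
  intro n
  induction n using Nat.strong_induction_on with
  | _ n ih =>
    intro lo hi hn hhi
    rw [pvProdRange]
    split_ifs with h0 h1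
    · simp [h0]
    · have hlt : lo < shape.length := by omega
      rw [h1, List.take_one, List.head?_drop]
      simp [List.getD, List.getElem?_eq_getElem hlt]
    · have hmid₁ : (lo + hi) / 2 - lo < n := by omega
      have hmid₂ : hi - (lo + hi) / 2 < n := by omega
      rw [ih _ hmid₁ lo _ rfl (by omega), ih _ hmid₂ _ hi rfl hhi]
      have hsplit : hi - lo = ((lo + hi) / 2 - lo) + (hi - (lo + hi) / 2) := by omega
      have hdd : lo + ((lo + hi) / 2 - lo) = (lo + hi) / 2 := by omega
      rw [hsplit, List.take_add, List.prod_append, List.drop_drop, hdd]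

-- ===== VERDICT =====
theorem validate_block_shape_spec : Claim_equal_validate_block_shape := by
  intro shape _ _
  unfold Spec_validate_block_shape validate_block_shape validate_block_shape_alt
  rw [pv_prodRange_eq shape _ 0 shape.length rfl le_rfl]
  simpa using pv_foldl_enum_mul shape 0 1
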